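-- pv_equiv track=rewrite | github.com/AMkuro/Python_Module08 | ex02/oracle.py | is_api_key
-- ===== SOURCE A (Python) =====
-- def is_api_key(val: str) -> bool:
--     allowed = set(
--         "ABCDEFGHIJKLMNOPQRSTUVWXYZabcdefghijklmnopqrstuvwxyz0123456789_-"
--     )
--     return (
--         len(val) >= 16
--         and all(c in allowed for c in val)
--         and val.startswith("api_")
--     )
-- ===== SOURCE B (Python) =====
-- import re
--
-- _API_KEY_RE = re.compile(r"api_[A-Za-z0-9_-]{12,}")
--
-- def is_api_key(val: str) -> bool:
--     return bool(_API_KEY_RE.fullmatch(val))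
-- ===== Notes on version B (the rewrite author's own statement) =====
-- stated objective: idiomatic
-- what changed: Replaced the explicit length, set-membership and prefix checks with a single anchored regular expression (re.fullmatch) whose pattern is the literal prefix followed by at least 12 characters of the allowed class.
import Mathlib
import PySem

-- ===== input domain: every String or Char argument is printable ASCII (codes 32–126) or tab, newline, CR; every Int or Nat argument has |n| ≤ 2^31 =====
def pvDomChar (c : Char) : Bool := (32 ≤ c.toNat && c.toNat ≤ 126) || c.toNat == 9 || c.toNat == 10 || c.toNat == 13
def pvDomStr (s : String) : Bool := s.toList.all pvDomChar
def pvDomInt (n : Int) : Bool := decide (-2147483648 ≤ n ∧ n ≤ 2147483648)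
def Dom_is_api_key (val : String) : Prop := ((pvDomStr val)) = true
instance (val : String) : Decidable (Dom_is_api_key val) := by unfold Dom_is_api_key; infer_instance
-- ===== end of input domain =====

-- B validates with one anchored regex instead of A's explicit length/set/prefix checks (objective: idiomatic).

-- ===== PORT A =====
def is_api_key (val : String) : Bool :=
  let allowed : PySem.Set Char :=
    PySem.Set.ofList "ABCDEFGHIJKLMNOPQRSTUVWXYZabcdefghijklmnopqrstuvwxyz0123456789_-".toList
  decide (PySem.Str.len val ≥ 16) && val.toList.all (fun c => PySem.Set.contains allowed c)
    && PySem.Str.startswith val "api_"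

-- ===== PORT B =====
-- the regex character class [A-Za-z0-9_-] (exact: three ranges plus two literal chars)
def pvKeyClass (c : Char) : Bool :=
  ('A' ≤ c && c ≤ 'Z') || ('a' ≤ c && c ≤ 'z') || ('0' ≤ c && c ≤ '9') || c == '_' || c == '-'

-- hand port of re.fullmatch(r"api_[A-Za-z0-9_-]{12,}", val): the literal prefix "api_" must
-- match the first four characters, and the anchored tail [A-Za-z0-9_-]{12,} matches the rest
-- iff every remaining character is in the class and there are at least 12 of them (exact: the
-- class-repetition at end-of-pattern can only match the whole remainder).
def is_api_key_alt (val : String) : Bool :=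
  match val.toList with
  | 'a' :: 'p' :: 'i' :: '_' :: rest => decide (rest.length ≥ 12) && rest.all pvKeyClass
  | _ => false

-- ===== PRECONDITION & SPEC =====
def Spec_is_api_key (val : String) (out : Bool) : Prop := out = is_api_key_alt val
instance (val : String) (out : Bool) : Decidable (Spec_is_api_key val out) := by unfold Spec_is_api_key; infer_instance

-- ===== CLAIM (what is proved, stated in full; the proofs are below) =====
def Claim_equal_is_api_key : Prop := ∀ (val : String), Dom_is_api_key val → Spec_is_api_key val (is_api_key val)

-- ===== LEMMAS AND PROOFS =====

theorem char_eq_iff_toNat (c d : Char) : c = d ↔ c.toNat = d.toNat := by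
  constructor
  · intro h; rw [h]
  · intro h; apply Char.ext; exact UInt32.toNat_inj.mp h

theorem mem_allowed_iff (c : Char) :
    c ∈ "ABCDEFGHIJKLMNOPQRSTUVWXYZabcdefghijklmnopqrstuvwxyz0123456789_-".toList
      ↔ pvKeyClass c = true := by
  rw [show "ABCDEFGHIJKLMNOPQRSTUVWXYZabcdefghijklmnopqrstuvwxyz0123456789_-".toList
      = ['A', 'B', 'C', 'D', 'E', 'F', 'G', 'H', 'I', 'J', 'K', 'L', 'M', 'N', 'O', 'P', 'Q', 'R', 'S', 'T', 'U', 'V', 'W', 'X', 'Y', 'Z', 'a', 'b', 'c', 'd', 'e', 'f', 'g', 'h', 'i', 'j', 'k', 'l', 'm', 'n', 'o', 'p', 'q', 'r', 's', 't', 'u', 'v', 'w', 'x', 'y', 'z', '0', '1', '2', '3', '4', '5', '6', '7', '8', '9', '_', '-'] from rfl]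
  simp only [pvKeyClass, Bool.or_eq_true, Bool.and_eq_true, decide_eq_true_eq, beq_iff_eq,
    List.mem_cons, List.not_mem_nil, or_false, char_eq_iff_toNat]
  simp [Char.le_def, UInt32.le_iff_toNat_le]
  omega

theorem contains_allowed_eq_class (c : Char) :
    PySem.Set.contains
      (PySem.Set.ofList "ABCDEFGHIJKLMNOPQRSTUVWXYZabcdefghijklmnopqrstuvwxyz0123456789_-".toList) c
      = pvKeyClass c := by
  cases hb : pvKeyClass c with
  | true =>
    rw [PySem.Set.contains_iff, PySem.Set.mem_ofList]
    exact (mem_allowed_iff c).mpr hb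
  | false =>
    rw [Bool.eq_false_iff]
    intro h
    rw [(mem_allowed_iff c).mp ((PySem.Set.mem_ofList _ _).mp ((PySem.Set.contains_iff _ _).mp h))] at hb
    exact absurd hb (by simp)

theorem ports_agree_aux (l : List Char) :
    ((decide ((l.length : Int) ≥ 16) && l.all fun c => pvKeyClass c)
        && PySem.Chars.startswith l "api_".toList)
      = (match l with
         | 'a' :: 'p' :: 'i' :: '_' :: rest => decide (rest.length ≥ 12) && rest.all pvKeyClass
         | _ => false) := by
  split
  case _ rest =>
    have hsw : PySem.Chars.startswith ('a' :: 'p' :: 'i' :: '_' :: rest) ['a', 'p', 'i', '_']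
        = true := by
      rw [PySem.Chars.startswith_iff]; exact ⟨rest, rfl⟩
    have h16 : (16 ≤ (rest.length : Int) + 1 + 1 + 1 + 1) ↔ (12 ≤ rest.length) := by
      omega
    simp [hsw, h16, show pvKeyClass 'a' = true from rfl, show pvKeyClass 'p' = true from rfl,
      show pvKeyClass 'i' = true from rfl, show pvKeyClass '_' = true from rfl]
  case _ hne =>
    rcases l with _ | ⟨c1, _ | ⟨c2, _ | ⟨c3, _ | ⟨c4, rest⟩⟩⟩⟩
    · simp
    · simp
    · simp
    · simp
    · have hsw : PySem.Chars.startswith (c1 :: c2 :: c3 :: c4 :: rest) ['a', 'p', 'i', '_']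
          = false := by
        rw [Bool.eq_false_iff]
        intro h
        rcases (PySem.Chars.startswith_iff _ _).mp h with ⟨t, ht⟩
        injection ht with e1 ht; injection ht with e2 ht
        injection ht with e3 ht; injection ht with e4 ht
        exact hne rest (by rw [← e1, ← e2, ← e3, ← e4, ← ht])
      simp [hsw]

theorem ports_agree (val : String) : is_api_key val = is_api_key_alt val := by
  unfold is_api_key is_api_key_alt
  simp only [contains_allowed_eq_class, PySem.Str.len_eq,
    PySem.Str.startswith_eq]
  exact ports_agree_aux val.toList

-- ===== VERDICT (by name: the statement is the Claim_ definition above) =====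
theorem is_api_key_spec : Claim_equal_is_api_key := by
  intro val _
  exact ports_agree val
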